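-- pv_equiv track=rewrite | github.com/jakubtdrewniak-debug/PythonProjectsKTH | Linalg-projektet/plot_test.py | base_gen
-- ===== SOURCE A (Python) =====
-- def base_gen(rad, Wid):
--     """Genererar punkter"""
--     node_list = []
--     y_mid = rad
--     x_mid = rad
--     z_end = Wid
--     for y in range(y_mid-rad,y_mid+rad):
--         for x in range(x_mid-rad,x_mid+rad):
--             if (y - y_mid)**2 + (x - x_mid)**2 <= rad**2:
--                 for z in range(0,z_end):
--                     node_list.append([x,y,z])
--     return node_list
-- ===== SOURCE B (Python) =====
-- import math
--
-- def base_gen(rad, Wid):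
--     """Genererar punkter"""
--     node_list = []
--     r2 = rad * rad
--     for y in range(0, 2 * rad):
--         s = math.isqrt(r2 - (y - rad) ** 2)
--         hi = min(rad + s, 2 * rad - 1)
--         for x in range(rad - s, hi + 1):
--             for z in range(0, Wid):
--                 node_list.append([x, y, z])
--     return node_list
-- ===== Notes on version B (the rewrite author's own statement) =====
-- stated objective: alternative
-- what changed: Instead of testing every cell of the 2rad x 2rad bounding square against the circle inequality, B computes each row's exact x-span with math.isqrt and iterates only over the in-disk cells (clamped to the square's right edge).
import Mathlib
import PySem

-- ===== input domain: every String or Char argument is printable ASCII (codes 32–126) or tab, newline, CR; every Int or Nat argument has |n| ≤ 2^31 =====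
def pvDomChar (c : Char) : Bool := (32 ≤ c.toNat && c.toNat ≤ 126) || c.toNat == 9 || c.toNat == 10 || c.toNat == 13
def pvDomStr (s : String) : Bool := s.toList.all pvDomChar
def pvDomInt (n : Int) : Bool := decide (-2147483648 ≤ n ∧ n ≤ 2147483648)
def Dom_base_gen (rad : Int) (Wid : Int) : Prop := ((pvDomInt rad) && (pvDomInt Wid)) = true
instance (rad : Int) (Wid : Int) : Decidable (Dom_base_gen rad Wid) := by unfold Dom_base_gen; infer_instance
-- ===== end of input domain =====

-- B computes each row's exact x-span with an integer square root instead of testing every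
-- cell of the bounding square; alternative algorithm, same output.

-- ===== PORT A =====
def base_gen (rad : Int) (Wid : Int) : List (List Int) :=
  let y_mid := rad
  let x_mid := rad
  let z_end := Wid
  (PySem.List.pyRange (y_mid - rad) (y_mid + rad) 1).foldl (fun node_list y =>
    (PySem.List.pyRange (x_mid - rad) (x_mid + rad) 1).foldl (fun nl x =>
      if (y - y_mid) ^ 2 + (x - x_mid) ^ 2 ≤ rad ^ 2 then
        (PySem.List.pyRange 0 z_end 1).foldl (fun nl2 z => nl2 ++ [[x, y, z]]) nl
      else nl) node_list) []

-- ===== PORT B =====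
-- math.isqrt → Int.sqrt: exact, since its argument r2 - (y-rad)^2 is nonnegative for every
-- y produced by range(0, 2*rad).
def base_gen_alt (rad : Int) (Wid : Int) : List (List Int) :=
  let r2 := rad * rad
  (PySem.List.pyRange 0 (2 * rad) 1).foldl (fun node_list y =>
    let s := Int.sqrt (r2 - (y - rad) ^ 2)
    let hi := min (rad + s) (2 * rad - 1)
    (PySem.List.pyRange (rad - s) (hi + 1) 1).foldl (fun nl x =>
      (PySem.List.pyRange 0 Wid 1).foldl (fun nl2 z => nl2 ++ [[x, y, z]]) nl) node_list) []

-- ===== PRECONDITION & SPEC =====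
def Spec_base_gen (rad : Int) (Wid : Int) (out : List (List Int)) : Prop := out = base_gen_alt rad Wid
instance (rad : Int) (Wid : Int) (out : List (List Int)) : Decidable (Spec_base_gen rad Wid out) := by unfold Spec_base_gen; infer_instance

-- ===== CLAIM (what is proved, stated in full; the proofs are below) =====
def Claim_equal_base_gen : Prop := ∀ (rad : Int) (Wid : Int), Dom_base_gen rad Wid → Spec_base_gen rad Wid (base_gen rad Wid)

-- ===== LEMMAS AND PROOFS =====

theorem pv_sqrt_sq_le (R : Int) (hR : 0 ≤ R) : Int.sqrt R * Int.sqrt R ≤ R := by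
  have h := Nat.sqrt_le' R.toNat
  rw [pow_two] at h
  have h2 : ((Nat.sqrt R.toNat : Int)) * (Nat.sqrt R.toNat : Int) ≤ (R.toNat : Int) := by
    exact_mod_cast h
  unfold Int.sqrt
  omega

theorem pv_lt_succ_sqrt (R : Int) (hR : 0 ≤ R) : R < (Int.sqrt R + 1) * (Int.sqrt R + 1) := by
  have h := Nat.lt_succ_sqrt' R.toNat
  rw [pow_two, Nat.succ_eq_add_one] at h
  have h2 : (R.toNat : Int) < ((Nat.sqrt R.toNat : Int) + 1) * ((Nat.sqrt R.toNat : Int) + 1) := by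
    exact_mod_cast h
  unfold Int.sqrt
  omega

-- Integer square root brackets the square: d*d ≤ R ↔ |d| ≤ sqrt R (for 0 ≤ R).
theorem pv_sq_le_iff_sqrt (R d : Int) (hR : 0 ≤ R) :
    d * d ≤ R ↔ -Int.sqrt R ≤ d ∧ d ≤ Int.sqrt R := by
  have h1 := pv_sqrt_sq_le R hR
  have h2 := pv_lt_succ_sqrt R hR
  have h0 : 0 ≤ Int.sqrt R := Int.sqrt_nonneg R
  constructor
  · intro h
    constructor <;> nlinarith
  · rintro ⟨ha, hb⟩
    nlinarith

-- Filtering a range with an interval predicate yields the clipped range.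
theorem pv_filter_interval_aux (p : Int → Bool) (lo hi : Int)
    (hp : ∀ x, p x = true ↔ lo ≤ x ∧ x < hi) :
    ∀ (n : Nat) (a b : Int), b - a ≤ n → (PySem.List.pyRange a b 1).filter p =
      PySem.List.pyRange (max a lo) (min b hi) 1 := by
  intro n
  induction n with
  | zero =>
    intro a b h
    rw [PySem.List.pyRange_one_eq_nil (by omega), PySem.List.pyRange_one_eq_nil (by omega)]
    rfl
  | succ m ih =>
    intro a b h
    by_cases hab : b ≤ a
    · rw [PySem.List.pyRange_one_eq_nil hab, PySem.List.pyRange_one_eq_nil (by omega)]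
      rfl
    · have hab' : a < b := by omega
      rw [show PySem.List.pyRange a b 1 = a :: PySem.List.pyRange (a + 1) b 1 from
        PySem.List.pyRange_one_cons hab']
      rw [List.filter_cons, ih (a + 1) b (by omega)]
      by_cases hpa : p a = true
      · have hint := (hp a).mp hpa
        rw [if_pos hpa]
        have hA : max a lo = a := by omega
        have hB : max (a + 1) lo = a + 1 := by omega
        rw [hA, hB]
        rw [show PySem.List.pyRange a (min b hi) 1 =
          a :: PySem.List.pyRange (a + 1) (min b hi) 1 from PySem.List.pyRange_one_cons (by omega)]
      · rw [if_neg hpa]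
        have hout : ¬(lo ≤ a ∧ a < hi) := fun hc => hpa ((hp a).mpr hc)
        by_cases hcase : a < lo
        · have : max (a + 1) lo = max a lo := by omega
          rw [this]
        · have hhi : hi ≤ a := by omega
          rw [PySem.List.pyRange_one_eq_nil (by omega), PySem.List.pyRange_one_eq_nil (by omega)]

theorem pv_filter_pyRange_interval (p : Int → Bool) (lo hi : Int)
    (hp : ∀ x, p x = true ↔ lo ≤ x ∧ x < hi) (a b : Int) :
    (PySem.List.pyRange a b 1).filter p = PySem.List.pyRange (max a lo) (min b hi) 1 :=
  pv_filter_interval_aux p lo hi hp (b - a).toNat a b (by omega)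

-- flatMap of a guarded block = flatMap over the filtered list.
theorem pv_flatMap_ite (l : List Int) (p : Int → Bool) (g : Int → List (List Int)) :
    l.flatMap (fun x => if p x then g x else []) = (l.filter p).flatMap g := by
  induction l with
  | nil => rfl
  | cons a t ih =>
    rw [List.flatMap_cons, List.filter_cons]
    by_cases hpa : p a = true
    · rw [if_pos hpa, if_pos hpa, List.flatMap_cons, ih]
    · rw [if_neg hpa, if_neg hpa, ih]
      simp

-- One row of A equals one row of B (for y inside the outer range).
theorem pv_row_eq (rad Wid y : Int) (hy0 : 0 ≤ y) (hy1 : y < 2 * rad) (acc : List (List Int)) :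
    (PySem.List.pyRange (rad - rad) (rad + rad) 1).foldl (fun nl x =>
      if (y - rad) ^ 2 + (x - rad) ^ 2 ≤ rad ^ 2 then
        (PySem.List.pyRange 0 Wid 1).foldl (fun nl2 z => nl2 ++ [[x, y, z]]) nl
      else nl) acc =
    (PySem.List.pyRange (rad - Int.sqrt (rad * rad - (y - rad) ^ 2))
        (min (rad + Int.sqrt (rad * rad - (y - rad) ^ 2)) (2 * rad - 1) + 1) 1).foldl (fun nl x =>
      (PySem.List.pyRange 0 Wid 1).foldl (fun nl2 z => nl2 ++ [[x, y, z]]) nl) acc := by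
  have hrad : 1 ≤ rad := by omega
  set R : Int := rad * rad - (y - rad) ^ 2 with hR
  have hRnn : 0 ≤ R := by rw [hR]; nlinarith
  set s : Int := Int.sqrt R with hs
  have hsn : 0 ≤ s := Int.sqrt_nonneg R
  have hsr : s ≤ rad := by
    have h1 : s * s ≤ R := pv_sqrt_sq_le R hRnn
    nlinarith
  have hzb : ∀ (x : Int) (nl : List (List Int)),
      (PySem.List.pyRange 0 Wid 1).foldl (fun nl2 z => nl2 ++ [[x, y, z]]) nl =
      nl ++ (PySem.List.pyRange 0 Wid 1).map (fun z => [x, y, z]) := by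
    intro x nl
    exact PySem.List.foldl_append_singleton_eq_map _ _ _
  have hL : (PySem.List.pyRange (rad - rad) (rad + rad) 1).foldl (fun nl x =>
      if (y - rad) ^ 2 + (x - rad) ^ 2 ≤ rad ^ 2 then
        (PySem.List.pyRange 0 Wid 1).foldl (fun nl2 z => nl2 ++ [[x, y, z]]) nl
      else nl) acc =
      acc ++ (PySem.List.pyRange (rad - rad) (rad + rad) 1).flatMap (fun x =>
        if decide ((y - rad) ^ 2 + (x - rad) ^ 2 ≤ rad ^ 2) then
          (PySem.List.pyRange 0 Wid 1).map (fun z => [x, y, z]) else []) := by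
    rw [PySem.List.foldl_congr_mem (g := fun nl x =>
        nl ++ (if decide ((y - rad) ^ 2 + (x - rad) ^ 2 ≤ rad ^ 2) then
          (PySem.List.pyRange 0 Wid 1).map (fun z => [x, y, z]) else []))]
    · exact PySem.List.foldl_append_eq_flatMap _ _ _
    · intro nl x _
      by_cases h : (y - rad) ^ 2 + (x - rad) ^ 2 ≤ rad ^ 2
      · rw [if_pos h, if_pos (by exact decide_eq_true h), hzb]
      · rw [if_neg h, if_neg (by simpa using h)]
        simp
  have hRHS : (PySem.List.pyRange (rad - s) (min (rad + s) (2 * rad - 1) + 1) 1).foldl (fun nl x =>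
      (PySem.List.pyRange 0 Wid 1).foldl (fun nl2 z => nl2 ++ [[x, y, z]]) nl) acc =
      acc ++ (PySem.List.pyRange (rad - s) (min (rad + s) (2 * rad - 1) + 1) 1).flatMap (fun x =>
        (PySem.List.pyRange 0 Wid 1).map (fun z => [x, y, z])) := by
    rw [PySem.List.foldl_congr_mem (g := fun nl x =>
        nl ++ (PySem.List.pyRange 0 Wid 1).map (fun z => [x, y, z]))]
    · exact PySem.List.foldl_append_eq_flatMap _ _ _
    · intro nl x _
      exact hzb x nl
  rw [hL, hRHS]
  congr 1
  rw [pv_flatMap_ite]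
  congr 1
  have hp : ∀ x : Int, (decide ((y - rad) ^ 2 + (x - rad) ^ 2 ≤ rad ^ 2)) = true ↔
      rad - s ≤ x ∧ x < rad + s + 1 := by
    intro x
    rw [decide_eq_true_iff]
    have hiff := pv_sq_le_iff_sqrt R (x - rad) hRnn
    rw [← hs] at hiff
    constructor
    · intro h
      have hsq : (x - rad) * (x - rad) ≤ R := by rw [hR]; nlinarith [sq_nonneg (x - rad)]
      have := hiff.mp hsq
      omega
    · intro h
      have hsq : (x - rad) * (x - rad) ≤ R := hiff.mpr ⟨by omega, by omega⟩
      nlinarith [sq_nonneg (x - rad)]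
  rw [pv_filter_pyRange_interval _ (rad - s) (rad + s + 1) hp (rad - rad) (rad + rad)]
  congr 1 <;> omega

-- ===== VERDICT (by name: the statement is the Claim_ definition above) =====
theorem base_gen_spec : Claim_equal_base_gen := by
  intro rad Wid _
  unfold Spec_base_gen base_gen base_gen_alt
  simp only []
  have h2 : rad + rad = 2 * rad := by omega
  have h0 : rad - rad = 0 := by omega
  rw [h0, h2]
  apply PySem.List.foldl_congr_mem
  intro acc y hy
  rw [PySem.List.mem_pyRange_one] at hy
  have hrow := pv_row_eq rad Wid y hy.1 hy.2 acc
  rw [h0, h2] at hrow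
  exact hrow
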